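-- pv_equiv track=rewrite | github.com/CCZH-Vessel-Algor-Team/USV_Simulation | src/usv_sim_full/setup0.py | _strip_long_options
-- ===== SOURCE A (Python) =====
-- def _strip_long_options(argv):
--     # Remove long options and their possible values (used by some installers)
--     out = []
--     i = 0
--     while i < len(argv):
--         a = argv[i]
--         if a.startswith('--'):
--             # skip this option
--             i += 1
--             # if next token looks like a value (doesn't start with '-') skip it too
--             if i < len(argv) and not argv[i].startswith('-'):
--                 i += 1
--             continue
--         out.append(a)
--         i += 1
--     return out
-- ===== SOURCE B (Python) =====
-- def _strip_long_options(argv):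
--     # Stateless pairwise filter instead of a stateful scan: since a consumed
--     # value never starts with '-', a '--' token is ALWAYS an option regardless
--     # of what came before, so whether a token is dropped depends only on the
--     # token itself and its immediate predecessor:
--     #   drop a[i] iff a[i].startswith('--'), or
--     #                a[i-1].startswith('--') and not a[i].startswith('-').
--     prevs = [None] + argv[:-1]
--     return [a for prev, a in zip(prevs, argv)
--             if not a.startswith('--')
--             and not (prev is not None
--                      and prev.startswith('--')
--                      and not a.startswith('-'))]
-- ===== Notes on version B (the rewrite author's own statement) =====
-- stated objective: alternative
-- what changed: Replaces A's stateful while loop with index lookahead by a stateless pairwise filter: each token is kept or dropped by a closed-form condition on the token and its immediate predecessor (valid because a consumed value never starts with '-', so A's scan state collapses to the previous token).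
import Mathlib
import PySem

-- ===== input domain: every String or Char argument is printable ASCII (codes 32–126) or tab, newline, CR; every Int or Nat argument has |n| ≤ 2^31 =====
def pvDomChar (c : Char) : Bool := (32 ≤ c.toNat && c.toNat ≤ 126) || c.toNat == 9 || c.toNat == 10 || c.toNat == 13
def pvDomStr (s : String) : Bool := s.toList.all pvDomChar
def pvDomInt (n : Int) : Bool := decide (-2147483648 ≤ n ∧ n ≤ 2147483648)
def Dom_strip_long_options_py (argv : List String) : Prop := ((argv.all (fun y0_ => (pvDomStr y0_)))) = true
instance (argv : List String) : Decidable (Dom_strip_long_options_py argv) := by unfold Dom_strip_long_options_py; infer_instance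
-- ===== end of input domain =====

-- B replaces A's stateful scan by a stateless pairwise filter over (predecessor, token)
-- pairs (alternative decomposition, same O(n) cost).

-- ===== PORT A =====
-- A's while loop over index i; on a '--' token it advances i and peeks at the next
-- token, consuming it too when it does not start with '-'. Transcribed as structural
-- recursion on the remaining suffix (the suffix argv[i:] is the loop state).
def strip_long_options_py (argv : List String) : List String :=
  match argv with
  | [] => []
  | a :: rest =>
    if PySem.Str.startswith a "--" then
      match rest with
      | [] => []
      | b :: rest' =>
        if !(PySem.Str.startswith b "-") then
          strip_long_options_py rest'               -- skip option and its value
        else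
          strip_long_options_py (b :: rest')        -- skip option only
    else
      a :: strip_long_options_py rest
termination_by argv.length
decreasing_by all_goals simp

-- ===== PORT B =====
-- Source B's keep-condition on a (predecessor, token) pair.
def stripKeep (prev : Option String) (a : String) : Bool :=
  !(PySem.Str.startswith a "--") &&
  !((match prev with
     | some p => PySem.Str.startswith p "--"
     | none => false) && !(PySem.Str.startswith a "-"))

-- Source B: prevs = [None] + argv[:-1]; filter the zip by stripKeep, keep the tokens.
def strip_long_options_py_alt (argv : List String) : List String :=
  (((none :: argv.dropLast.map some).zip argv).filter
    (fun pa => stripKeep pa.1 pa.2)).map (·.2)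

-- ===== PRECONDITION & SPEC =====
def Spec_strip_long_options_py (argv : List String) (out : List String) : Prop := out = strip_long_options_py_alt argv
instance (argv : List String) (out : List String) : Decidable (Spec_strip_long_options_py argv out) := by unfold Spec_strip_long_options_py; infer_instance

-- ===== CLAIM (what is proved, stated in full; the proofs are below) =====
def Claim_equal_strip_long_options_py : Prop := ∀ (argv : List String), Dom_strip_long_options_py argv → Spec_strip_long_options_py argv (strip_long_options_py argv)

-- ===== LEMMAS AND PROOFS =====

-- B's computation with the first predecessor generalized.
def stripZip (prev : Option String) (argv : List String) : List String :=
  (((prev :: argv.dropLast.map some).zip argv).filter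
    (fun pa => stripKeep pa.1 pa.2)).map (·.2)

theorem stripZip_cons (prev : Option String) (a : String) (rest : List String) :
    stripZip prev (a :: rest)
      = (if stripKeep prev a then [a] else []) ++ stripZip (some a) rest := by
  cases rest with
  | nil => cases h : stripKeep prev a <;> simp [stripZip, List.filter, h]
  | cons b rest' =>
    simp only [stripZip, List.dropLast_cons₂, List.map_cons, List.zip_cons_cons,
      List.filter_cons]
    split <;> simp

-- What A computes after having just consumed a '--' option.
def stripSkip (argv : List String) : List String :=
  match argv with
  | [] => []
  | b :: rest' =>
    if !(PySem.Str.startswith b "-") then strip_long_options_py rest'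
    else strip_long_options_py (b :: rest')

theorem tl2 : ("--" : String).toList = ['-', '-'] := rfl
theorem tl1 : ("-" : String).toList = ['-'] := rfl

-- '--' is a prefix only of strings that also have prefix '-'.
theorem chars_dash_of_ddash {a : String} (h : PySem.Chars.startswith a.toList ['-', '-'] = true) :
    PySem.Chars.startswith a.toList ['-'] = true := by
  rw [PySem.Chars.startswith_iff] at h ⊢
  exact List.IsPrefix.trans ⟨['-'], rfl⟩ h

-- Unfolding equations of A's scan and its post-option state.
theorem A_ddash {a : String} {rest : List String}
    (h : PySem.Chars.startswith a.toList ['-', '-'] = true) :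
    strip_long_options_py (a :: rest) = stripSkip rest := by
  cases rest <;> simp [strip_long_options_py, stripSkip, PySem.Str.startswith, tl2, h]

theorem A_other {a : String} {rest : List String}
    (h : PySem.Chars.startswith a.toList ['-', '-'] = false) :
    strip_long_options_py (a :: rest) = a :: strip_long_options_py rest := by
  cases rest <;> simp [strip_long_options_py, PySem.Str.startswith, tl2, h]

theorem skip_dash {a : String} {rest : List String}
    (h : PySem.Chars.startswith a.toList ['-'] = true) :
    stripSkip (a :: rest) = strip_long_options_py (a :: rest) := by
  simp [stripSkip, PySem.Str.startswith, tl1, h]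

theorem skip_value {a : String} {rest : List String}
    (h : PySem.Chars.startswith a.toList ['-'] = false) :
    stripSkip (a :: rest) = strip_long_options_py rest := by
  simp [stripSkip, PySem.Str.startswith, tl1, h]

-- Core invariant: B's pairwise filter, with any predecessor seed, equals A's scan
-- in the state the predecessor induces (after a '--' option: stripSkip; else: A itself).
theorem stripZip_eq (argv : List String) : ∀ (prev : Option String),
    stripZip prev argv
      = if (match prev with
            | some p => PySem.Chars.startswith p.toList ['-', '-']
            | none => false) = true
        then stripSkip argv else strip_long_options_py argv := by
  induction argv with
  | nil => intro prev; cases prev <;> simp [stripZip, stripSkip, strip_long_options_py]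
  | cons a rest ih =>
    intro prev
    rw [stripZip_cons, ih (some a)]
    by_cases h2 : PySem.Chars.startswith a.toList ['-', '-'] = true
    · have h1 := chars_dash_of_ddash h2
      have hk : stripKeep prev a = false := by
        simp [stripKeep, PySem.Str.startswith, tl2, h2]
      rw [hk]
      cases prev with
      | none => simp [h2, A_ddash h2]
      | some p =>
        by_cases hp : PySem.Chars.startswith p.toList ['-', '-'] = true
        · -- previous was an option; a starts with '-' so it is reprocessed: also an option
          simp [hp, h2, skip_dash h1, A_ddash h2]
        · simp only [hp, Bool.false_eq_true] at *
          simp [h2, A_ddash h2]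
    · -- a is not a long option
      rw [Bool.not_eq_true] at h2
      cases prev with
      | none =>
        have hk : stripKeep none a = true := by
          simp [stripKeep, PySem.Str.startswith, tl2, h2]
        simp [hk, h2, A_other h2]
      | some p =>
        by_cases hp : PySem.Chars.startswith p.toList ['-', '-'] = true
        · -- previous was an option: a kept iff it starts with '-'
          by_cases h1 : PySem.Chars.startswith a.toList ['-'] = true
          · have hk : stripKeep (some p) a = true := by
              simp [stripKeep, PySem.Str.startswith, tl2, tl1, h2, h1]
            simp [hk, hp, h2, skip_dash h1, A_other h2]
          · rw [Bool.not_eq_true] at h1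
            have hk : stripKeep (some p) a = false := by
              simp [stripKeep, PySem.Str.startswith, tl2, tl1, hp, h1]
            simp [hk, hp, h2, skip_value h1]
        · rw [Bool.not_eq_true] at hp
          have hk : stripKeep (some p) a = true := by
            simp [stripKeep, PySem.Str.startswith, tl2, h2, hp]
          simp [hk, hp, h2, A_other h2]

-- ===== VERDICT (by name: the statement is the Claim_ definition above) =====
theorem strip_long_options_py_spec : Claim_equal_strip_long_options_py := by
  intro argv _
  unfold Spec_strip_long_options_py
  have h : strip_long_options_py_alt argv = stripZip none argv := rfl
  rw [h, stripZip_eq argv none]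
  simp
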